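-- pv_equiv track=rewrite | github.com/kmccullor/Technical-Service-Assistant | test_generator.py | generate_arrange_code
-- ===== SOURCE A (Python) =====
-- from typing import Dict, List, Optional
--
-- def generate_arrange_code(args: List[str]) -> str:
--     """Generate arrange section code for test arguments."""
--     if not args:
--         return "# No arguments required"
--
--     arrange_lines = []
--     for arg in args:
--         if "path" in arg.lower() or "file" in arg.lower():
--             arrange_lines.append(f'{arg} = "test_file.txt"')
--         elif "id" in arg.lower():
--             arrange_lines.append(f"{arg} = 1")
--         elif "name" in arg.lower():
--             arrange_lines.append(f'{arg} = "test_name"')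
--         elif "data" in arg.lower():
--             arrange_lines.append(f'{arg} = {{"test": "data"}}')
--         elif "list" in arg.lower():
--             arrange_lines.append(f'{arg} = ["item1", "item2"]')
--         else:
--             arrange_lines.append(f'{arg} = "test_value"')
--
--     return "\n    ".join(arrange_lines)
-- ===== SOURCE B (Python) =====
-- # Staged-overwrite rewrite: rules are applied in REVERSE priority order over a value
-- # table (rules outer loop, args inner loop); a later (higher-priority) rule overwrites
-- # earlier writes, so the last write per slot realises A's first-match priority.
-- _RULES = [
--     (("path", "file"), '"test_file.txt"'),
--     (("id",), "1"),
--     (("name",), '"test_name"'),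
--     (("data",), '{"test": "data"}'),
--     (("list",), '["item1", "item2"]'),
-- ]
--
--
-- def generate_arrange_code(args):
--     if not args:
--         return "# No arguments required"
--     lows = [a.lower() for a in args]
--     vals = ['"test_value"'] * len(args)
--     for kws, val in reversed(_RULES):
--         for i, low in enumerate(lows):
--             if any(k in low for k in kws):
--                 vals[i] = val
--     return "\n    ".join(f"{a} = {v}" for a, v in zip(args, vals))
-- ===== Notes on version B (the rewrite author's own statement) =====
-- stated objective: alternative
-- what changed: Inverts the loop nesting: instead of A's single pass over args with a first-match if/elif chain per argument, B makes one pass per rule in reverse priority order over a value table, overwriting slots so the last (highest-priority) write wins, then zips args with the table.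
import Mathlib
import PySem

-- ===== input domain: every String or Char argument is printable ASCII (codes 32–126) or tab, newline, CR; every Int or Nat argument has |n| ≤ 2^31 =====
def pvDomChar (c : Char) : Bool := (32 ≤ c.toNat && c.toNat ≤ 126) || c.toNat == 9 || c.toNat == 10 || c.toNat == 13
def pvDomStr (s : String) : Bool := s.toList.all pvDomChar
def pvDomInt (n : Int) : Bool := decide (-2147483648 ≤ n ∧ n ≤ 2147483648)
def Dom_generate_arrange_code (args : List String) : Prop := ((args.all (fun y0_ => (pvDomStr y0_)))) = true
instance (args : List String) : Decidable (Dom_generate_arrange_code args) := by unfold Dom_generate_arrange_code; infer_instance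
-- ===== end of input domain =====

-- B inverts the loop nesting: one pass per rule in reverse priority order over a value
-- table, last write wins, instead of A's first-match chain per argument (objective:
-- alternative, same cost).

-- ===== PORT A =====
def generate_arrange_code (args : List String) : String :=
  if args = [] then "# No arguments required"
  else
    let arrange_lines := args.foldl (fun acc arg =>
      if PySem.Str.isIn "path" (PySem.Str.lower arg) || PySem.Str.isIn "file" (PySem.Str.lower arg) then
        acc ++ [arg ++ " = \"test_file.txt\""]
      else if PySem.Str.isIn "id" (PySem.Str.lower arg) then
        acc ++ [arg ++ " = 1"]
      else if PySem.Str.isIn "name" (PySem.Str.lower arg) then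
        acc ++ [arg ++ " = \"test_name\""]
      else if PySem.Str.isIn "data" (PySem.Str.lower arg) then
        acc ++ [arg ++ " = {\"test\": \"data\"}"]
      else if PySem.Str.isIn "list" (PySem.Str.lower arg) then
        acc ++ [arg ++ " = [\"item1\", \"item2\"]"]
      else
        acc ++ [arg ++ " = \"test_value\""]) []
    PySem.Str.join "\n    " arrange_lines

-- ===== PORT B =====
def pvRules : List (List String × String) :=
  [ (["path", "file"], "\"test_file.txt\""),
    (["id"], "1"),
    (["name"], "\"test_name\""),
    (["data"], "{\"test\": \"data\"}"),
    (["list"], "[\"item1\", \"item2\"]") ]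

-- one sweep of B's inner loop: overwrite vals[i] where rule (kws, val) matches lows[i]
def pvApplyRule (lows vals kws : List String) (val : String) : List String :=
  List.zipWith (fun low old => if kws.any (fun k => PySem.Str.isIn k low) then val else old) lows vals

def generate_arrange_code_alt (args : List String) : String :=
  if args = [] then "# No arguments required"
  else
    let lows := args.map (fun a => PySem.Str.lower a)
    let vals0 := lows.map (fun _ => "\"test_value\"")
    let vals := pvRules.reverse.foldl (fun vals r => pvApplyRule lows vals r.1 r.2) vals0
    PySem.Str.join "\n    " (List.zipWith (fun a v => a ++ " = " ++ v) args vals)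

-- ===== PRECONDITION & SPEC =====
def Spec_generate_arrange_code (args : List String) (out : String) : Prop := out = generate_arrange_code_alt args
instance (args : List String) (out : String) : Decidable (Spec_generate_arrange_code args out) := by unfold Spec_generate_arrange_code; infer_instance

-- ===== CLAIM (what is proved, stated in full; the proofs are below) =====
def Claim_equal_generate_arrange_code : Prop := ∀ (args : List String), Dom_generate_arrange_code args → Spec_generate_arrange_code args (generate_arrange_code args)

-- ===== LEMMAS AND PROOFS =====

-- the value A's if/elif chain assigns to one (lowercased) argument
def pvChain (low : String) : String :=
  if PySem.Str.isIn "path" low || PySem.Str.isIn "file" low then "\"test_file.txt\""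
  else if PySem.Str.isIn "id" low then "1"
  else if PySem.Str.isIn "name" low then "\"test_name\""
  else if PySem.Str.isIn "data" low then "{\"test\": \"data\"}"
  else if PySem.Str.isIn "list" low then "[\"item1\", \"item2\"]"
  else "\"test_value\""

-- zipWith against a mapped copy of the same list is a map
theorem zipWith_map_self {α β γ : Type} (f : α → β → γ) (g : α → β) :
    ∀ (xs : List α), List.zipWith f xs (xs.map g) = xs.map (fun x => f x (g x))
  | [] => rfl
  | x :: xs => by simp [zipWith_map_self f g xs]

-- B's rules-outer fold over the slot table acts independently on each slot
theorem fold_apply_eq_map (lows : List String) :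
    ∀ (rs : List (List String × String)) (g : String → String),
      rs.foldl (fun vals r => pvApplyRule lows vals r.1 r.2) (lows.map g)
        = lows.map (fun low =>
            rs.foldl (fun v r => if r.1.any (fun k => PySem.Str.isIn k low) then r.2 else v) (g low))
  | [], g => rfl
  | r :: rs, g => by
    simp only [List.foldl_cons, pvApplyRule]
    rw [zipWith_map_self]
    exact fold_apply_eq_map lows rs _

-- per slot, the reverse-order last-write-wins fold over the concrete rules
-- is definitionally A's first-match chain
theorem slot_eq (low : String) :
    pvRules.reverse.foldl (fun v r => if r.1.any (fun k => PySem.Str.isIn k low) then r.2 else v)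
      "\"test_value\"" = pvChain low := by
  simp only [pvRules, pvChain, List.reverse_cons, List.reverse_nil, List.nil_append,
    List.cons_append, List.foldl_cons, List.foldl_nil, List.any_cons, List.any_nil, Bool.or_false]

theorem main_eq (args : List String) :
    generate_arrange_code args = generate_arrange_code_alt args := by
  by_cases h : args = []
  · simp [generate_arrange_code, generate_arrange_code_alt, h]
  · have hA : generate_arrange_code args
        = PySem.Str.join "\n    " (args.map (fun arg => arg ++ " = " ++ pvChain (PySem.Str.lower arg))) := by
      simp only [generate_arrange_code, h, if_false]
      congr 1
      have hstep : (fun (acc : List String) (arg : String) =>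
          if PySem.Str.isIn "path" (PySem.Str.lower arg) || PySem.Str.isIn "file" (PySem.Str.lower arg) then
            acc ++ [arg ++ " = \"test_file.txt\""]
          else if PySem.Str.isIn "id" (PySem.Str.lower arg) then acc ++ [arg ++ " = 1"]
          else if PySem.Str.isIn "name" (PySem.Str.lower arg) then acc ++ [arg ++ " = \"test_name\""]
          else if PySem.Str.isIn "data" (PySem.Str.lower arg) then acc ++ [arg ++ " = {\"test\": \"data\"}"]
          else if PySem.Str.isIn "list" (PySem.Str.lower arg) then acc ++ [arg ++ " = [\"item1\", \"item2\"]"]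
          else acc ++ [arg ++ " = \"test_value\""])
          = fun acc arg => acc ++ [arg ++ " = " ++ pvChain (PySem.Str.lower arg)] := by
        funext acc arg
        simp only [pvChain]
        split_ifs <;> simp [String.append_assoc]
      rw [hstep, PySem.List.foldl_append_singleton_eq_map, List.nil_append]
    have hB : generate_arrange_code_alt args
        = PySem.Str.join "\n    " (args.map (fun arg => arg ++ " = " ++ pvChain (PySem.Str.lower arg))) := by
      simp only [generate_arrange_code_alt, h, if_false]
      rw [fold_apply_eq_map]
      simp only [slot_eq, List.map_map]
      rw [zipWith_map_self]
      rfl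
    rw [hA, hB]

-- ===== VERDICT (by name: the statement is the Claim_ definition above) =====
theorem generate_arrange_code_spec : Claim_equal_generate_arrange_code := by
  intro args _
  exact main_eq args
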